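-- pv_equiv track=rewrite | github.com/akab00m/ms_demand_sort | sort_demand.py | _extract_barcodes
-- ===== SOURCE A (Python) =====
-- def _extract_barcodes(assortment: dict) -> tuple[str, str]:
--     """Вернуть (code128, ean13) из поля barcodes ассортимента."""
--     code128 = ""
--     ean13 = ""
--     for entry in assortment.get("barcodes") or []:
--         if not isinstance(entry, dict):
--             continue
--         if "code128" in entry:
--             code128 = str(entry["code128"])
--         elif "ean13" in entry:
--             ean13 = str(entry["ean13"])
--     return code128, ean13
-- ===== SOURCE B (Python) =====
-- def _extract_barcodes(assortment: dict) -> tuple[str, str]: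
--     """Вернуть (code128, ean13) из поля barcodes ассортимента."""
--     entries = [e for e in (assortment.get("barcodes") or []) if isinstance(e, dict)]
--     code128 = next((str(e["code128"]) for e in reversed(entries) if "code128" in e), "")
--     ean13 = next((str(e["ean13"]) for e in reversed(entries)
--                   if "ean13" in e and "code128" not in e), "")
--     return code128, ean13
-- ===== Notes on version B (the rewrite author's own statement) =====
-- stated objective: alternative
-- what changed: Replaces the single forward accumulating loop with two independent reverse searches: code128 is taken from the last entry containing 'code128', ean13 from the last entry containing 'ean13' but not 'code128'.
import Mathlib
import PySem

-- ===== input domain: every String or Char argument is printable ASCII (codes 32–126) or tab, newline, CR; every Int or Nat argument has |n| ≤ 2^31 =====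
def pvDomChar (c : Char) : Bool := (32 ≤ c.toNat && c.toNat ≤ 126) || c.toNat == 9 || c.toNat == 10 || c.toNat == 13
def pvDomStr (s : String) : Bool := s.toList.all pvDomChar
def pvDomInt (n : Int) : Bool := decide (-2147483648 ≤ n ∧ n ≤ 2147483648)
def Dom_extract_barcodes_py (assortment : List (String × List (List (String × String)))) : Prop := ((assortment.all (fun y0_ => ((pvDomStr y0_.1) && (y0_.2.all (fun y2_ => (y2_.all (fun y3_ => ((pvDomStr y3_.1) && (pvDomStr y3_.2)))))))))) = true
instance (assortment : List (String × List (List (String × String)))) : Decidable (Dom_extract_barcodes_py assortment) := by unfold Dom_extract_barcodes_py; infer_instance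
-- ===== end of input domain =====

-- B replaces A's single forward accumulating loop with two independent reverse searches
-- (last matching entry for each key); same O(n) cost, different decomposition.

-- ===== PORT A =====
-- first-match lookup in an association list (Python dict lookup under the type convention)
def pvLookup (d : List (String × String)) (k : String) : Option String :=
  (d.find? (fun p => p.1 == k)).map (·.2)

-- 'k in entry'
def pvHas (d : List (String × String)) (k : String) : Bool :=
  d.any (fun p => p.1 == k)

-- one iteration of A's for-loop body (entry is always a dict here, so the isinstance
-- guard is always true under the type convention); str() on a str is the identity
def pvStepA (st : String × String) (entry : List (String × String)) : String × String :=
  if pvHas entry "code128" then ((pvLookup entry "code128").getD "", st.2)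
  else if pvHas entry "ean13" then (st.1, (pvLookup entry "ean13").getD "")
  else st

def extract_barcodes_py (assortment : List (String × List (List (String × String)))) : String × String :=
  -- assortment.get("barcodes") or []  (a None or [] value both give [])
  let entries := (((assortment.find? (fun p => p.1 == "barcodes")).map (·.2)).getD [])
  entries.foldl pvStepA ("", "")

-- ===== PORT B =====
def extract_barcodes_py_alt (assortment : List (String × List (List (String × String)))) : String × String :=
  let entries := (((assortment.find? (fun p => p.1 == "barcodes")).map (·.2)).getD [])
  let code128 := ((entries.reverse.find? (fun e => pvHas e "code128")).map
      (fun e => (pvLookup e "code128").getD "")).getD ""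
  let ean13 := ((entries.reverse.find? (fun e => pvHas e "ean13" && !pvHas e "code128")).map
      (fun e => (pvLookup e "ean13").getD "")).getD ""
  (code128, ean13)

-- ===== PRECONDITION & SPEC =====
def Spec_extract_barcodes_py (assortment : List (String × List (List (String × String)))) (out : String × String) : Prop := out = extract_barcodes_py_alt assortment
instance (assortment : List (String × List (List (String × String)))) (out : String × String) : Decidable (Spec_extract_barcodes_py assortment out) := by unfold Spec_extract_barcodes_py; infer_instance

-- ===== CLAIM (what is proved, stated in full; the proofs are below) =====
def Claim_equal_extract_barcodes_py : Prop := ∀ (assortment : List (String × List (List (String × String)))), Dom_extract_barcodes_py assortment → Spec_extract_barcodes_py assortment (extract_barcodes_py assortment)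

-- ===== LEMMAS AND PROOFS =====

-- ===== VERDICT (by name: the statement is the Claim_ definition above) =====
-- the fold from the left computes exactly the two reverse searches, for any start state
theorem pvFold_eq (es : List (List (String × String))) : ∀ (st : String × String),
    es.foldl pvStepA st =
      (((es.reverse.find? (fun e => pvHas e "code128")).map
          (fun e => (pvLookup e "code128").getD "")).getD st.1,
       ((es.reverse.find? (fun e => pvHas e "ean13" && !pvHas e "code128")).map
          (fun e => (pvLookup e "ean13").getD "")).getD st.2) := by
  induction es using List.reverseRecOn with
  | nil => intro st; simp
  | append_singleton es e ih =>
    intro st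
    simp only [List.foldl_append, List.foldl_cons, List.foldl_nil, List.reverse_append,
      List.reverse_singleton, List.singleton_append, List.find?_cons, ih]
    unfold pvStepA
    by_cases h1 : pvHas e "code128" <;> by_cases h2 : pvHas e "ean13" <;> simp [h1, h2]

theorem extract_barcodes_py_spec : Claim_equal_extract_barcodes_py := by
  intro assortment _
  show _ = _
  unfold extract_barcodes_py extract_barcodes_py_alt
  exact pvFold_eq _ ("", "")
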